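-- pv_equiv track=rewrite | github.com/vinayakas1997/data_conversion_opcua | 1_Triton_csv_data/plc_data_converter.py | to_uint64
-- ===== SOURCE A (Python) =====
-- def to_uint64(hex_array):
--     """
--     Convert four 16-bit hex strings to unsigned 64-bit integer.
--
--     Args:
--         hex_array: List of 4 hex strings
--
--     Returns:
--         int: Unsigned 64-bit integer
--     """
--     if len(hex_array) < 4:
--         raise ValueError("UINT64 requires 4 hex words")
--
--     value = 0
--     for i, hex_str in enumerate(hex_array[:4]):
--         word = int(hex_str, 16)
--         value |= (word << (48 - i * 16))
--     return value
-- ===== SOURCE B (Python) =====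
-- def to_uint64(hex_array):
--     """Pairwise (divide-and-conquer) reduction: parse all four words first,
--     then repeatedly merge adjacent pairs (16->32->64 bit) until one value is left."""
--     if len(hex_array) < 4:
--         raise ValueError("UINT64 requires 4 hex words")
--     vals = [int(h, 16) for h in hex_array[:4]]
--     width = 16
--     while len(vals) > 1:
--         vals = [(vals[i] << width) | vals[i + 1] for i in range(0, len(vals), 2)]
--         width *= 2
--     return vals[0]
-- ===== Notes on version B (the rewrite author's own statement) =====
-- stated objective: alternative
-- what changed: Replaces A's single indexed accumulation loop (OR each parsed word at precomputed offset 48-16*i) with a staged pairwise reduction: a parse pass builds the word list, then adjacent pairs are repeatedly merged (16->32->64 bit) until one value remains; equal because shifting distributes over OR, so the combine tree may be reassociated.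
-- outside the precondition, e.g. on to_uint64(['zz', '0', '0', '0']): A raises ValueError, B raises ValueError; on to_uint64(['1', '2', '3']): A raises ValueError, B raises ValueError
import Mathlib
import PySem

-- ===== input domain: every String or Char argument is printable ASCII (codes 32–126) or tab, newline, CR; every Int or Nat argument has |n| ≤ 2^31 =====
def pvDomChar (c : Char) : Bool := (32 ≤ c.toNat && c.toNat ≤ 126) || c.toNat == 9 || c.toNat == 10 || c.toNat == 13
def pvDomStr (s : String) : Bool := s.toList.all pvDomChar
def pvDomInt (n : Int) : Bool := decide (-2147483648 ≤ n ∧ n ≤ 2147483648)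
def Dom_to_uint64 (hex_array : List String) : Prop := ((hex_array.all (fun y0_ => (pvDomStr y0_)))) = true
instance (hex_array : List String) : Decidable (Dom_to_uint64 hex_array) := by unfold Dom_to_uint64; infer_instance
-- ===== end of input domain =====

-- B replaces A's single indexed accumulation loop (OR each word at offset 48 - 16*i) with a
-- staged pairwise reduction: parse all four words first, then merge adjacent pairs
-- (16→32→64 bit) until one value is left; an alternative decomposition, same cost.

-- ===== PORT A =====
-- value |= int(hex_str, 16) << (48 - i*16), over enumerate(hex_array[:4]).
-- On len < 4 or an unparsable word Python raises ValueError (excluded by Pre_); the port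
-- returns 0 / uses getD 0 there, nothing is claimed on those inputs.
def to_uint64 (hex_array : List String) : Int :=
  if hex_array.length < 4 then 0
  else
    (PySem.List.enumerate (PySem.List.slice hex_array none (some 4)) 0).foldl
      (fun value iw =>
        PySem.Int.bor value (((PySem.Int.ofStrBase? iw.2 16).getD 0) <<< (48 - iw.1 * 16).toNat))
      0

-- ===== PORT B =====
-- one body of B's while loop: vals = [(vals[i] << width) | vals[i+1] for i in range(0, len(vals), 2)]
def pvPairStep (width : Int) (vals : List Int) : List Int :=
  (PySem.List.pyRange 0 vals.length 2).map
    (fun i => PySem.Int.bor (((PySem.List.pyGet? vals i).getD 0) <<< width.toNat)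
                            ((PySem.List.pyGet? vals (i + 1)).getD 0))

-- while len(vals) > 1: … ; the list at least halves each turn, so len(vals) is enough fuel
def pvPackLoop : Nat → Int → List Int → List Int
  | 0, _, vals => vals
  | fuel + 1, width, vals =>
    if 1 < vals.length then pvPackLoop fuel (width * 2) (pvPairStep width vals) else vals

def to_uint64_alt (hex_array : List String) : Int :=
  if hex_array.length < 4 then 0
  else
    let vals := (PySem.List.slice hex_array none (some 4)).map
      (fun h => (PySem.Int.ofStrBase? h 16).getD 0)
    ((PySem.List.pyGet? (pvPackLoop vals.length 16 vals) 0).getD 0)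

-- ===== PRECONDITION & SPEC =====
-- Pre_ excludes exactly the inputs where A raises ValueError: fewer than 4 words, or one
-- of the first 4 words not parsable as base-16 (both A and B raise there).
def Pre_to_uint64 (hex_array : List String) : Prop :=
  4 ≤ hex_array.length ∧
  ((hex_array.take 4).all (fun s => (PySem.Int.ofStrBase? s 16).isSome)) = true
instance (hex_array : List String) : Decidable (Pre_to_uint64 hex_array) := by
  unfold Pre_to_uint64; infer_instance
def pvWitness_to_uint64 : List String := (["ffff", "1", "2", "3"])

def Spec_to_uint64 (hex_array : List String) (out : Int) : Prop := out = to_uint64_alt hex_array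
instance (hex_array : List String) (out : Int) : Decidable (Spec_to_uint64 hex_array out) := by unfold Spec_to_uint64; infer_instance

-- ===== CLAIM (what is proved, stated in full; the proofs are below) =====
def Claim_equal_to_uint64 : Prop := ∀ (hex_array : List String), Dom_to_uint64 hex_array → Pre_to_uint64 hex_array → Spec_to_uint64 hex_array (to_uint64 hex_array)

-- ===== LEMMAS AND PROOFS =====

-- a bit prepended to a Nat, through &&& and |||
lemma nat_bit_or (x y : Bool) (m n : Nat) :
    (2*m + x.toNat) ||| (2*n + y.toNat) = 2*(m ||| n) + (x || y).toNat := by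
  apply Nat.eq_of_testBit_eq; intro k
  have h1 : (2*m + x.toNat)/2 = m := by cases x <;> simp <;> omega
  have h2 : (2*n + y.toNat)/2 = n := by cases y <;> simp <;> omega
  have h3 : (2*(m ||| n) + (x || y).toNat)/2 = m ||| n := by cases x <;> cases y <;> simp <;> omega
  cases k with
  | zero => cases x <;> cases y <;> simp [Nat.testBit_zero] <;> omega
  | succ k =>
    rw [Nat.testBit_lor, Nat.testBit_add_one, Nat.testBit_add_one, Nat.testBit_add_one,
      h1, h2, h3, Nat.testBit_lor]

lemma nat_bit_and (x y : Bool) (m n : Nat) :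
    (2*m + x.toNat) &&& (2*n + y.toNat) = 2*(m &&& n) + (x && y).toNat := by
  apply Nat.eq_of_testBit_eq; intro k
  have h1 : (2*m + x.toNat)/2 = m := by cases x <;> simp <;> omega
  have h2 : (2*n + y.toNat)/2 = n := by cases y <;> simp <;> omega
  have h3 : (2*(m &&& n) + (x && y).toNat)/2 = m &&& n := by cases x <;> cases y <;> simp <;> omega
  cases k with
  | zero => cases x <;> cases y <;> simp [Nat.testBit_zero] <;> omega
  | succ k =>
    rw [Nat.testBit_and, Nat.testBit_add_one, Nat.testBit_add_one, Nat.testBit_add_one,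
      h1, h2, h3, Nat.testBit_and]

-- a bit prepended to an Int, through Python's |
lemma bor_bit (x y : Bool) (a b : Int) :
    PySem.Int.bor (2*a + x.toNat) (2*b + y.toNat) = 2 * PySem.Int.bor a b + (x || y).toNat := by
  unfold PySem.Int.bor
  have hx : (x.toNat : Int) = if x then 1 else 0 := by cases x <;> simp
  have hy : (y.toNat : Int) = if y then 1 else 0 := by cases y <;> simp
  by_cases ha : 0 ≤ a <;> by_cases hb : 0 ≤ b
  · have h2a : (0:Int) ≤ 2*a + x.toNat := by cases x <;> simp at hx ⊢ <;> omega
    have h2b : (0:Int) ≤ 2*b + y.toNat := by cases y <;> simp at hy ⊢ <;> omega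
    simp only [if_pos ha, if_pos hb, if_pos h2a, if_pos h2b]
    have e1 : (2*a + (x.toNat:Int)).toNat = 2*a.toNat + x.toNat := by cases x <;> simp at hx ⊢ <;> omega
    have e2 : (2*b + (y.toNat:Int)).toNat = 2*b.toNat + y.toNat := by cases y <;> simp at hy ⊢ <;> omega
    rw [e1, e2, nat_bit_or]; push_cast; ring
  · have h2a : (0:Int) ≤ 2*a + x.toNat := by cases x <;> simp at hx ⊢ <;> omega
    have h2b : ¬ (0:Int) ≤ 2*b + y.toNat := by cases y <;> simp at hy ⊢ <;> omega
    simp only [if_pos ha, if_neg hb, if_pos h2a, if_neg h2b]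
    have e1 : (-(2*b + (y.toNat:Int)) - 1).toNat = 2*(-b-1).toNat + (!y).toNat := by
      cases y <;> simp at hy ⊢ <;> omega
    have e2 : (2*a + (x.toNat:Int)).toNat = 2*a.toNat + x.toNat := by cases x <;> simp at hx ⊢ <;> omega
    rw [e1, e2, nat_bit_and]
    have hle : (-b-1).toNat &&& a.toNat ≤ (-b-1).toNat := Nat.and_le_left
    have hbit : ((!y) && x).toNat ≤ (!y).toNat := by cases x <;> cases y <;> simp
    have e3 : 2*(-b-1).toNat + (!y).toNat - (2*((-b-1).toNat &&& a.toNat) + ((!y) && x).toNat)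
        = 2*((-b-1).toNat - ((-b-1).toNat &&& a.toNat)) + ((!y).toNat - ((!y) && x).toNat) := by omega
    rw [e3]
    have e4 : ((!y).toNat - ((!y) && x).toNat) = (!(x || y)).toNat := by cases x <;> cases y <;> simp
    rw [e4]
    push_cast [Nat.sub_eq, hle]
    cases x <;> cases y <;> simp <;> omega
  · have h2a : ¬ (0:Int) ≤ 2*a + x.toNat := by cases x <;> simp at hx ⊢ <;> omega
    have h2b : (0:Int) ≤ 2*b + y.toNat := by cases y <;> simp at hy ⊢ <;> omega
    simp only [if_neg ha, if_pos hb, if_neg h2a, if_pos h2b]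
    have e1 : (-(2*a + (x.toNat:Int)) - 1).toNat = 2*(-a-1).toNat + (!x).toNat := by
      cases x <;> simp at hx ⊢ <;> omega
    have e2 : (2*b + (y.toNat:Int)).toNat = 2*b.toNat + y.toNat := by cases y <;> simp at hy ⊢ <;> omega
    rw [e1, e2, nat_bit_and]
    have hle : (-a-1).toNat &&& b.toNat ≤ (-a-1).toNat := Nat.and_le_left
    have e3 : 2*(-a-1).toNat + (!x).toNat - (2*((-a-1).toNat &&& b.toNat) + ((!x) && y).toNat)
        = 2*((-a-1).toNat - ((-a-1).toNat &&& b.toNat)) + ((!x).toNat - ((!x) && y).toNat) := by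
      have : ((!x) && y).toNat ≤ (!x).toNat := by cases x <;> cases y <;> simp
      omega
    rw [e3]
    have e4 : ((!x).toNat - ((!x) && y).toNat) = (!(x || y)).toNat := by cases x <;> cases y <;> simp
    rw [e4]
    push_cast [Nat.sub_eq, hle]
    cases x <;> cases y <;> simp <;> omega
  · have h2a : ¬ (0:Int) ≤ 2*a + x.toNat := by cases x <;> simp at hx ⊢ <;> omega
    have h2b : ¬ (0:Int) ≤ 2*b + y.toNat := by cases y <;> simp at hy ⊢ <;> omega
    simp only [if_neg ha, if_neg hb, if_neg h2a, if_neg h2b]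
    have e1 : (-(2*a + (x.toNat:Int)) - 1).toNat = 2*(-a-1).toNat + (!x).toNat := by
      cases x <;> simp at hx ⊢ <;> omega
    have e2 : (-(2*b + (y.toNat:Int)) - 1).toNat = 2*(-b-1).toNat + (!y).toNat := by
      cases y <;> simp at hy ⊢ <;> omega
    rw [e1, e2, nat_bit_and]
    have e4 : ((!x) && (!y)).toNat = (!(x || y)).toNat := by cases x <;> cases y <;> simp
    rw [e4]
    cases h : (x || y)
    all_goals simp only [Bool.not_true, Bool.not_false, Bool.toNat_true, Bool.toNat_false]
    all_goals push_cast
    all_goals omega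

-- every Int is 2a'+bit, with the half smaller in |·| except at the fixpoints 0 and -1
lemma int_bit_decomp (a : Int) :
    ∃ (a' : Int) (x : Bool), a = 2*a' + x.toNat ∧ (a ≠ 0 → a ≠ -1 → a'.natAbs < a.natAbs) := by
  rcases Int.even_or_odd a with ⟨k, hk⟩ | ⟨k, hk⟩
  · refine ⟨k, false, ?_, ?_⟩
    · have hb : ((false : Bool).toNat : Int) = 0 := rfl
      rw [hk, hb]; ring
    · intro h0 h1; rw [hk] at h0 h1 ⊢; omega
  · refine ⟨k, true, ?_, ?_⟩
    · have hb : ((true : Bool).toNat : Int) = 1 := rfl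
      rw [hk, hb]
    · intro h0 h1; rw [hk] at h0 h1 ⊢; omega

-- Python's | on Int is associative
lemma bor_assoc (a b c : Int) :
    PySem.Int.bor (PySem.Int.bor a b) c = PySem.Int.bor a (PySem.Int.bor b c) := by
  have key : ∀ (n : Nat) (a b c : Int), a.natAbs + b.natAbs + c.natAbs ≤ n →
      PySem.Int.bor (PySem.Int.bor a b) c = PySem.Int.bor a (PySem.Int.bor b c) := by
    intro n
    induction n with
    | zero =>
      intro a b c h
      have : a = 0 ∧ b = 0 ∧ c = 0 := by omega
      obtain ⟨rfl, rfl, rfl⟩ := this; decide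
    | succ n ih =>
      intro a b c h
      by_cases hbase : (a = 0 ∨ a = -1) ∧ (b = 0 ∨ b = -1) ∧ (c = 0 ∨ c = -1)
      · obtain ⟨ha, hb, hc⟩ := hbase
        rcases ha with rfl | rfl <;> rcases hb with rfl | rfl <;> rcases hc with rfl | rfl <;> decide
      · obtain ⟨a', x, rfl, hda⟩ := int_bit_decomp a
        obtain ⟨b', y, rfl, hdb⟩ := int_bit_decomp b
        obtain ⟨c', z, rfl, hdc⟩ := int_bit_decomp c
        -- the measure decreases: some variable is outside {0,-1}, the others do not grow
        have ha' : a'.natAbs ≤ (2*a' + (x.toNat:Int)).natAbs := by cases x <;> simp <;> omega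
        have hb' : b'.natAbs ≤ (2*b' + (y.toNat:Int)).natAbs := by cases y <;> simp <;> omega
        have hc' : c'.natAbs ≤ (2*c' + (z.toNat:Int)).natAbs := by cases z <;> simp <;> omega
        have hmeas : a'.natAbs + b'.natAbs + c'.natAbs ≤ n := by
          by_cases hA : (2*a' + (x.toNat:Int)) = 0 ∨ (2*a' + (x.toNat:Int)) = -1
          · by_cases hB : (2*b' + (y.toNat:Int)) = 0 ∨ (2*b' + (y.toNat:Int)) = -1
            · have hC : ¬ ((2*c' + (z.toNat:Int)) = 0 ∨ (2*c' + (z.toNat:Int)) = -1) := by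
                intro hC; exact hbase ⟨hA, hB, hC⟩
              push_neg at hC
              have := hdc hC.1 hC.2; omega
            · push_neg at hB
              have := hdb hB.1 hB.2; omega
          · push_neg at hA
            have := hda hA.1 hA.2; omega
        rw [bor_bit x y a' b', bor_bit (x || y) z (PySem.Int.bor a' b') c',
          bor_bit y z b' c', bor_bit x (y || z) a' (PySem.Int.bor b' c'),
          ih a' b' c' hmeas, Bool.or_assoc]
  exact key (a.natAbs + b.natAbs + c.natAbs) a b c le_rfl

-- doubling distributes over Python's int OR (bor_bit with both bits clear)
lemma bor_two_mul (a b : Int) : PySem.Int.bor (2*a) (2*b) = 2 * PySem.Int.bor a b := by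
  have h := bor_bit false false a b
  simpa using h

-- multiplying by 2^k distributes over Python's int OR
lemma bor_mul_pow (a b : Int) (k : Nat) :
    PySem.Int.bor (a * 2^k) (b * 2^k) = PySem.Int.bor a b * 2^k := by
  induction k with
  | zero => simp
  | succ k ih =>
    have e : ∀ x : Int, x * 2^(k+1) = 2 * (x * 2^k) := by intro x; ring
    rw [e, e, e, bor_two_mul, ih]

lemma bor_shiftLeft (a b : Int) (k : Nat) :
    PySem.Int.bor (a <<< k) (b <<< k) = PySem.Int.bor a b <<< k := by
  simp only [Int.shiftLeft_eq]; exact bor_mul_pow a b k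

lemma bor_zero_left (a : Int) : PySem.Int.bor 0 a = a := by
  rw [PySem.Int.bor_comm, PySem.Int.bor_zero]

lemma shl_shl (a : Int) (m n : Nat) : (a <<< m) <<< n = a <<< (m + n) := by
  simp [Int.shiftLeft_eq, pow_add]; ring

-- A's nested positional OR at offsets 48/32/16/0 equals B's pairwise combine tree
lemma tree4 (w0 w1 w2 w3 : Int) :
    PySem.Int.bor (PySem.Int.bor (PySem.Int.bor (PySem.Int.bor 0 (w0 <<< (48:Nat))) (w1 <<< (32:Nat))) (w2 <<< (16:Nat))) (w3 <<< (0:Nat))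
      = PySem.Int.bor ((PySem.Int.bor (w0 <<< (16:Nat)) w1) <<< (32:Nat)) (PySem.Int.bor (w2 <<< (16:Nat)) w3) := by
  rw [bor_zero_left]
  have h30 : w3 <<< (0:Nat) = w3 := by simp
  rw [h30, ← bor_shiftLeft, shl_shl]
  norm_num
  exact bor_assoc _ _ _

-- ===== VERDICT (by name: the statement is the Claim_ definition above) =====
theorem to_uint64_spec : Claim_equal_to_uint64 := by
  intro hex_array _ hpre
  rcases hpre with ⟨hlen, _⟩
  unfold Spec_to_uint64 to_uint64 to_uint64_alt
  rw [if_neg (by omega), if_neg (by omega)]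
  obtain ⟨s0, s1, s2, s3, rest, rfl⟩ :
      ∃ s0 s1 s2 s3 rest, hex_array = s0 :: s1 :: s2 :: s3 :: rest := by
    match hex_array, hlen with
    | s0 :: s1 :: s2 :: s3 :: rest, _ => exact ⟨s0, s1, s2, s3, rest, rfl⟩
  have hsl : PySem.List.slice (s0 :: s1 :: s2 :: s3 :: rest) none (some 4)
      = [s0, s1, s2, s3] := by
    rw [PySem.List.slice_to _ (by norm_num)]; rfl
  rw [hsl]
  simp only [PySem.List.enumerate_cons, PySem.List.enumerate_nil, List.foldl, List.map]
  have e0 : ((48:Int) - 0*16).toNat = 48 := by decide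
  have e1 : ((48:Int) - (0+1)*16).toNat = 32 := by decide
  have e2 : ((48:Int) - (0+1+1)*16).toNat = 16 := by decide
  have e3 : ((48:Int) - (0+1+1+1)*16).toNat = 0 := by decide
  rw [e0, e1, e2, e3]
  simp only [Int.shiftLeft_natCast_right]
  set w0 := (PySem.Int.ofStrBase? s0 16).getD 0
  set w1 := (PySem.Int.ofStrBase? s1 16).getD 0
  set w2 := (PySem.Int.ofStrBase? s2 16).getD 0
  set w3 := (PySem.Int.ofStrBase? s3 16).getD 0
  have hpack : pvPackLoop ([w0, w1, w2, w3] : List Int).length 16 [w0, w1, w2, w3]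
      = [PySem.Int.bor ((PySem.Int.bor (w0 <<< (16:Nat)) w1) <<< (32:Nat)) (PySem.Int.bor (w2 <<< (16:Nat)) w3)] := by
    have hstep1 : pvPairStep 16 [w0, w1, w2, w3]
        = [PySem.Int.bor (w0 <<< (16:Nat)) w1, PySem.Int.bor (w2 <<< (16:Nat)) w3] := by
      unfold pvPairStep
      have hr4 : PySem.List.pyRange 0 ((4:Nat) : Int) 2 = [0, 2] := by decide
      rw [show ([w0, w1, w2, w3] : List Int).length = 4 from rfl, hr4]
      simp [PySem.List.pyGet?, PySem.List.pyIdx?]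
    have hstep2 : pvPairStep 32 [PySem.Int.bor (w0 <<< (16:Nat)) w1, PySem.Int.bor (w2 <<< (16:Nat)) w3]
        = [PySem.Int.bor ((PySem.Int.bor (w0 <<< (16:Nat)) w1) <<< (32:Nat)) (PySem.Int.bor (w2 <<< (16:Nat)) w3)] := by
      unfold pvPairStep
      have hr2 : PySem.List.pyRange 0 ((2:Nat) : Int) 2 = [0] := by decide
      rw [show ([PySem.Int.bor (w0 <<< (16:Nat)) w1, PySem.Int.bor (w2 <<< (16:Nat)) w3] : List Int).length = 2 from rfl, hr2]
      simp [PySem.List.pyGet?, PySem.List.pyIdx?]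
    have L1 : pvPackLoop 4 16 [w0, w1, w2, w3] = pvPackLoop 3 32 (pvPairStep 16 [w0, w1, w2, w3]) := by
      simp [pvPackLoop]
    rw [show ([w0, w1, w2, w3] : List Int).length = 4 from rfl, L1, hstep1]
    have L2 : pvPackLoop 3 32 [PySem.Int.bor (w0 <<< (16:Nat)) w1, PySem.Int.bor (w2 <<< (16:Nat)) w3]
        = pvPackLoop 2 64 (pvPairStep 32 [PySem.Int.bor (w0 <<< (16:Nat)) w1, PySem.Int.bor (w2 <<< (16:Nat)) w3]) := by
      simp [pvPackLoop]
    rw [L2, hstep2]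
    simp [pvPackLoop]
  rw [hpack]
  simp only [PySem.List.pyGet?_zero_cons, Option.getD_some]
  exact tree4 w0 w1 w2 w3
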